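-- pv_equiv track=rewrite | github.com/abhistudioai2010-tech/ClearAlert-AML-MVP | python/inference.py | identify_columns
-- ===== SOURCE A (Python) =====
-- def identify_columns(columns):
--     """
--     Heuristically identify key business columns based on name substrings.
--     Returns a dict with identified column names (or None if not found).
--     """
--     cols = {c.lower(): c for c in columns}
--
--     mapping = {
--         'id_col': None,
--         'customer_col': None,
--         'amount_col': None,
--         'type_col': None,
--         'country_col': None
--     }
--
--     for cl, orig in cols.items():
--         if not mapping['id_col'] and ('id' in cl or 'reference' in cl or 'ref' in cl):
--             mapping['id_col'] = orig
--         elif not mapping['customer_col'] and ('name' in cl or 'cust' in cl or 'client' in cl or 'party' in cl or 'entity' in cl):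
--             mapping['customer_col'] = orig
--         elif not mapping['amount_col'] and ('amount' in cl or 'value' in cl or 'sum' in cl or 'total' in cl or 'amt' in cl):
--             mapping['amount_col'] = orig
--         elif not mapping['type_col'] and ('type' in cl or 'category' in cl or 'desc' in cl or 'kind' in cl):
--             mapping['type_col'] = orig
--         elif not mapping['country_col'] and ('country' in cl or 'nation' in cl or 'juris' in cl or 'dest' in cl or 'source' in cl):
--             mapping['country_col'] = orig
--
--     # Fallback to first column as ID if none found
--     if not mapping['id_col'] and len(columns) > 0:
--         mapping['id_col'] = columns[0]
--
--     return mapping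
-- ===== SOURCE B (Python) =====
-- ROLE_KEYWORDS = [
--     ('id_col', ('id', 'reference', 'ref')),
--     ('customer_col', ('name', 'cust', 'client', 'party', 'entity')),
--     ('amount_col', ('amount', 'value', 'sum', 'total', 'amt')),
--     ('type_col', ('type', 'category', 'desc', 'kind')),
--     ('country_col', ('country', 'nation', 'juris', 'dest', 'source')),
-- ]
--
--
-- def identify_columns(columns):
--     """
--     Heuristically identify key business columns based on name substrings.
--     Returns a dict with identified column names (or None if not found).
--     """
--     cols = {c.lower(): c for c in columns}
--
--     mapping = {}
--     used = set()
--     for role, keywords in ROLE_KEYWORDS: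
--         found = None
--         for cl, orig in cols.items():
--             if cl not in used and any(kw in cl for kw in keywords):
--                 found = orig
--                 used.add(cl)
--                 break
--         mapping[role] = found
--
--     # Fallback to first column as ID if none found
--     if not mapping['id_col'] and len(columns) > 0:
--         mapping['id_col'] = columns[0]
--
--     return mapping
-- ===== Notes on version B (the rewrite author's own statement) =====
-- stated objective: alternative
-- what changed: A makes one pass over the lowercased-name dict assigning each column to the first unfilled role of its elif chain; B instead loops over an ordered (role, keywords) table and, per role, scans the dict for the first not-yet-used matching column, tracking used columns in a set.
import Mathlib
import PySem

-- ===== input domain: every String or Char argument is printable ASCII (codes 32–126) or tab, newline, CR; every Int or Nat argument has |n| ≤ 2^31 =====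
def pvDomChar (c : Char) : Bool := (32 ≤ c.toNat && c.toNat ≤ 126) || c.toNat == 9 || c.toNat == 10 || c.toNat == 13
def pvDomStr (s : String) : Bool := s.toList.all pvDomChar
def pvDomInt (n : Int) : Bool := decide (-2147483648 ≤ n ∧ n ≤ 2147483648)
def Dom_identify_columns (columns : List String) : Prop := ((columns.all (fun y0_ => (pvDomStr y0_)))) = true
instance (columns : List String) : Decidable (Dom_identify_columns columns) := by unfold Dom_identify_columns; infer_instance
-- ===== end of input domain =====

-- B re-decomposes A's single per-column elif-chain pass into a per-role search (priority
-- list of (role, keywords), first unused matching column per role); same cost, proved equal.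

-- Python truthiness of a value that is None or a str ('not mapping[...]').
def pvTruthy : Option String → Bool
  | none => false
  | some s => !(s == "")

-- ===== PORT A =====
def identify_columns (columns : List String) : List (String × Option String) :=
  let cols : PySem.Dict String String :=
    columns.foldl (fun d c => d.insert (PySem.Str.lower c) c) PySem.Dict.empty
  let mapping : PySem.Dict String (Option String) :=
    (((((PySem.Dict.empty.insert "id_col" none).insert "customer_col" none).insert
        "amount_col" none).insert "type_col" none).insert "country_col" none)
  let mapping := cols.items.foldl (fun m p =>
    if !pvTruthy (m.getD "id_col" none) &&
        (PySem.Str.isIn "id" p.1 || PySem.Str.isIn "reference" p.1 || PySem.Str.isIn "ref" p.1) then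
      m.insert "id_col" (some p.2)
    else if !pvTruthy (m.getD "customer_col" none) &&
        (PySem.Str.isIn "name" p.1 || PySem.Str.isIn "cust" p.1 || PySem.Str.isIn "client" p.1 ||
         PySem.Str.isIn "party" p.1 || PySem.Str.isIn "entity" p.1) then
      m.insert "customer_col" (some p.2)
    else if !pvTruthy (m.getD "amount_col" none) &&
        (PySem.Str.isIn "amount" p.1 || PySem.Str.isIn "value" p.1 || PySem.Str.isIn "sum" p.1 ||
         PySem.Str.isIn "total" p.1 || PySem.Str.isIn "amt" p.1) then
      m.insert "amount_col" (some p.2)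
    else if !pvTruthy (m.getD "type_col" none) &&
        (PySem.Str.isIn "type" p.1 || PySem.Str.isIn "category" p.1 || PySem.Str.isIn "desc" p.1 ||
         PySem.Str.isIn "kind" p.1) then
      m.insert "type_col" (some p.2)
    else if !pvTruthy (m.getD "country_col" none) &&
        (PySem.Str.isIn "country" p.1 || PySem.Str.isIn "nation" p.1 || PySem.Str.isIn "juris" p.1 ||
         PySem.Str.isIn "dest" p.1 || PySem.Str.isIn "source" p.1) then
      m.insert "country_col" (some p.2)
    else m) mapping
  let mapping :=
    if !pvTruthy (mapping.getD "id_col" none) && decide ((0 : Int) < PySem.List.len columns) then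
      mapping.insert "id_col" (some (PySem.List.pyGetD columns 0 ""))
    else mapping
  mapping.items

-- ===== PORT B =====
-- module constant ROLE_KEYWORDS of Source B
def pvRoleKeywords : List (String × List String) :=
  [("id_col", ["id", "reference", "ref"]),
   ("customer_col", ["name", "cust", "client", "party", "entity"]),
   ("amount_col", ["amount", "value", "sum", "total", "amt"]),
   ("type_col", ["type", "category", "desc", "kind"]),
   ("country_col", ["country", "nation", "juris", "dest", "source"])]

def identify_columns_alt (columns : List String) : List (String × Option String) :=
  let cols : PySem.Dict String String :=
    columns.foldl (fun d c => d.insert (PySem.Str.lower c) c) PySem.Dict.empty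
  -- outer loop over roles; inner scan-with-break over cols.items, ported as find?
  let st := pvRoleKeywords.foldl
    (fun (st : PySem.Dict String (Option String) × PySem.Set String) rk =>
      match cols.items.find? (fun p => !st.2.contains p.1 && rk.2.any (fun kw => PySem.Str.isIn kw p.1)) with
      | some p => (st.1.insert rk.1 (some p.2), st.2.add p.1)
      | none => (st.1.insert rk.1 none, st.2))
    (PySem.Dict.empty, PySem.Set.ofList [])
  let mapping := st.1
  let mapping :=
    if !pvTruthy (mapping.getD "id_col" none) && decide ((0 : Int) < PySem.List.len columns) then
      mapping.insert "id_col" (some (PySem.List.pyGetD columns 0 ""))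
    else mapping
  mapping.items

-- ===== PRECONDITION & SPEC =====
def Spec_identify_columns (columns : List String) (out : List (String × Option String)) : Prop := out = identify_columns_alt columns
instance (columns : List String) (out : List (String × Option String)) : Decidable (Spec_identify_columns columns out) := by unfold Spec_identify_columns; infer_instance

-- ===== CLAIM (what is proved, stated in full; the proofs are below) =====
def Claim_equal_identify_columns : Prop := ∀ (columns : List String), Dom_identify_columns columns → Spec_identify_columns columns (identify_columns columns)

-- ===== LEMMAS AND PROOFS =====

-- abstract matchers
def pvM (kws : List String) (cl : String) : Bool := kws.any (fun kw => PySem.Str.isIn kw cl)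
def pvM1 : String → Bool := pvM ["id", "reference", "ref"]
def pvM2 : String → Bool := pvM ["name", "cust", "client", "party", "entity"]
def pvM3 : String → Bool := pvM ["amount", "value", "sum", "total", "amt"]
def pvM4 : String → Bool := pvM ["type", "category", "desc", "kind"]
def pvM5 : String → Bool := pvM ["country", "nation", "juris", "dest", "source"]
def pvAnyM (cl : String) : Bool := pvM1 cl || pvM2 cl || pvM3 cl || pvM4 cl || pvM5 cl

-- abstract A: assign a column to the first unfilled role it matches
def pvStepA : List ((String → Bool) × Option String) → String × String → List ((String → Bool) × Option String)
  | [], _ => []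
  | (m, o) :: rs, x => if !o.isSome && m x.1 then (m, some x.2) :: rs else (m, o) :: pvStepA rs x

def pvRunA (items : List (String × String)) (rs : List ((String → Bool) × Option String)) :
    List ((String → Bool) × Option String) :=
  items.foldl pvStepA rs

-- abstract B: per role, first unused matching column
def pvFind (m : String → Bool) (u : PySem.Set String) (items : List (String × String)) :
    Option (String × String) :=
  items.find? (fun p => !u.contains p.1 && m p.1)

def pvRunB (items : List (String × String)) :
    List ((String → Bool) × Option String) → PySem.Set String → List (Option String)
  | [], _ => []
  | (m, o) :: rs, u =>
    match o with
    | some v => some v :: pvRunB items rs u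
    | none =>
      match pvFind m u items with
      | some p => some p.2 :: pvRunB items rs (PySem.Set.add u p.1)
      | none => none :: pvRunB items rs u

def pvMap5 (a b c d e : Option String) : PySem.Dict String (Option String) :=
  PySem.Dict.mk [("id_col", a), ("customer_col", b), ("amount_col", c), ("type_col", d), ("country_col", e)]

def pvOk (o : Option String) : Prop := o = none ∨ ∃ v, o = some v ∧ v ≠ ""

theorem pvTruthy_ok (o : Option String) (h : pvOk o) : pvTruthy o = o.isSome := by
  rcases h with h | ⟨v, rfl, hv⟩ <;> simp [pvTruthy, *]

theorem pv_find?_congr {α : Type} (p q : α → Bool) (l : List α) (h : ∀ x ∈ l, p x = q x) :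
    l.find? p = l.find? q := by
  induction l with
  | nil => rfl
  | cons x t ih =>
    simp only [List.find?]
    rw [h x (by simp)]
    cases q x <;> simp [ih (fun y hy => h y (by simp [hy]))]

theorem pv_contains_add (u : PySem.Set String) (x k : String) :
    (PySem.Set.add u x).contains k = (u.contains k || k == x) := by
  simp only [PySem.Set.add]
  by_cases hx : u.contains x = true
  · rw [if_pos hx]
    by_cases hk : k = x
    · subst hk; rw [hx]; simp
    · have hb : (k == x) = false := by simp [hk]
      rw [hb]; simp
  · rw [if_neg hx]
    by_cases hk : k = x <;> simp [hk]

theorem pvFind_congr (m : String → Bool) (u1 u2 : PySem.Set String) (items : List (String × String))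
    (h : ∀ k ∈ items.map Prod.fst, u1.contains k = u2.contains k) :
    pvFind m u1 items = pvFind m u2 items := by
  apply pv_find?_congr
  intro p hp
  rw [h p.1 (List.mem_map_of_mem hp)]

theorem pvRunB_congr_used (items : List (String × String)) :
    ∀ (rs : List ((String → Bool) × Option String)) (u1 u2 : PySem.Set String),
      (∀ k ∈ items.map Prod.fst, u1.contains k = u2.contains k) →
      pvRunB items rs u1 = pvRunB items rs u2 := by
  intro rs
  induction rs with
  | nil => intro _ _ _; rfl
  | cons r rs ih =>
    intro u1 u2 h
    obtain ⟨m, o⟩ := r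
    cases o with
    | some v => simp only [pvRunB]; rw [ih u1 u2 h]
    | none =>
      simp only [pvRunB]
      rw [pvFind_congr m u1 u2 items h]
      cases hf : pvFind m u2 items with
      | none => rw [ih u1 u2 h]
      | some p =>
        dsimp only
        rw [ih (PySem.Set.add u1 p.1) (PySem.Set.add u2 p.1)
          (fun k hk => by rw [pv_contains_add, pv_contains_add, h k hk])]

theorem pvRunB_skip_head (x : String × String) (rest : List (String × String)) :
    ∀ (rs : List ((String → Bool) × Option String)) (u : PySem.Set String),
      u.contains x.1 = true →
      pvRunB (x :: rest) rs u = pvRunB rest rs u := by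
  intro rs
  induction rs with
  | nil => intro _ _; rfl
  | cons r rs ih =>
    intro u hu
    obtain ⟨m, o⟩ := r
    cases o with
    | some v => simp only [pvRunB]; rw [ih u hu]
    | none =>
      have hfind : pvFind m u (x :: rest) = pvFind m u rest := by
        simp only [pvFind, List.find?, hu]
        simp
      simp only [pvRunB, hfind]
      cases hf : pvFind m u rest with
      | none => rw [ih u hu]
      | some p =>
        dsimp only
        rw [ih (PySem.Set.add u p.1) (by rw [pv_contains_add, hu]; simp)]

theorem pvRunB_nil (rs : List ((String → Bool) × Option String)) (u : PySem.Set String) :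
    pvRunB [] rs u = rs.map (·.2) := by
  induction rs generalizing u with
  | nil => rfl
  | cons r rs ih =>
    obtain ⟨m, o⟩ := r
    cases o <;> simp [pvRunB, pvFind, ih]

theorem pvRunB_absorb (x : String × String) (rest : List (String × String))
    (hx : x.1 ∉ rest.map Prod.fst) :
    ∀ (rs : List ((String → Bool) × Option String)) (u : PySem.Set String),
      u.contains x.1 = false →
      pvRunB (x :: rest) rs u = pvRunB rest (pvStepA rs x) u := by
  intro rs
  induction rs with
  | nil => intro u _; simp [pvStepA, pvRunB]
  | cons r rs ih =>
    intro u hu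
    obtain ⟨m, o⟩ := r
    cases o with
    | some v =>
      have hstep : pvStepA ((m, some v) :: rs) x = (m, some v) :: pvStepA rs x := by
        simp [pvStepA]
      rw [hstep]
      simp only [pvRunB]
      rw [ih u hu]
    | none =>
      cases hm : m x.1 with
      | true =>
        have hstep : pvStepA ((m, none) :: rs) x = (m, some x.2) :: rs := by
          simp [pvStepA, hm]
        have hfind : pvFind m u (x :: rest) = some x := by
          simp only [pvFind, List.find?, hu, hm]
          simp
        rw [hstep]
        simp only [pvRunB, hfind]
        rw [pvRunB_skip_head x rest rs (PySem.Set.add u x.1)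
          (by rw [pv_contains_add]; simp)]
        rw [pvRunB_congr_used rest rs (PySem.Set.add u x.1) u
          (fun k hk => by
            rw [pv_contains_add]
            have : k ≠ x.1 := fun h => hx (h ▸ hk)
            simp [this])]
      | false =>
        have hstep : pvStepA ((m, none) :: rs) x = (m, none) :: pvStepA rs x := by
          simp [pvStepA, hm]
        have hfind : pvFind m u (x :: rest) = pvFind m u rest := by
          simp only [pvFind, List.find?, hm]
          simp
        rw [hstep]
        simp only [pvRunB, hfind]
        cases hf : pvFind m u rest with
        | none => rw [ih u hu]
        | some p =>
          dsimp only
          have hp : p ∈ rest := by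
            have := List.mem_of_find?_eq_some hf
            exact this
          have hne : x.1 ≠ p.1 := by
            intro h
            exact hx (h ▸ List.mem_map_of_mem hp)
          rw [ih (PySem.Set.add u p.1)
            (by rw [pv_contains_add, hu]; simp [hne])]

theorem pvRunA_eq_runB (items : List (String × String)) (hnd : (items.map Prod.fst).Nodup) :
    ∀ (rs : List ((String → Bool) × Option String)) (u : PySem.Set String),
      (∀ k, u.contains k = true → k ∉ items.map Prod.fst) →
      (pvRunA items rs).map (·.2) = pvRunB items rs u := by
  induction items with
  | nil => intro rs u _; rw [pvRunB_nil]; rfl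
  | cons x rest ih =>
    intro rs u hu
    have hx : x.1 ∉ rest.map Prod.fst := by
      simp only [List.map_cons, List.nodup_cons] at hnd
      exact hnd.1
    have hux : u.contains x.1 = false := by
      by_contra h
      have h' : u.contains x.1 = true := by
        cases h2 : u.contains x.1
        · exact absurd h2 h
        · rfl
      exact hu x.1 h' (by simp)
    rw [pvRunB_absorb x rest hx rs u hux]
    have : pvRunA (x :: rest) rs = pvRunA rest (pvStepA rs x) := rfl
    rw [this]
    apply ih (by simp only [List.map_cons, List.nodup_cons] at hnd; exact hnd.2)
    intro k hk hmem
    exact hu k hk (by simp [hmem])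


-- pvMap5 lookup / update facts (literal keys compute)
theorem pvMap5_getD1 (a b c d e : Option String) : (pvMap5 a b c d e).getD "id_col" none = a := rfl
theorem pvMap5_getD2 (a b c d e : Option String) : (pvMap5 a b c d e).getD "customer_col" none = b := rfl
theorem pvMap5_getD3 (a b c d e : Option String) : (pvMap5 a b c d e).getD "amount_col" none = c := rfl
theorem pvMap5_getD4 (a b c d e : Option String) : (pvMap5 a b c d e).getD "type_col" none = d := rfl
theorem pvMap5_getD5 (a b c d e : Option String) : (pvMap5 a b c d e).getD "country_col" none = e := rfl
theorem pvMap5_ins1 (a b c d e v : Option String) : (pvMap5 a b c d e).insert "id_col" v = pvMap5 v b c d e := rfl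
theorem pvMap5_ins2 (a b c d e v : Option String) : (pvMap5 a b c d e).insert "customer_col" v = pvMap5 a v c d e := rfl
theorem pvMap5_ins3 (a b c d e v : Option String) : (pvMap5 a b c d e).insert "amount_col" v = pvMap5 a b v d e := rfl
theorem pvMap5_ins4 (a b c d e v : Option String) : (pvMap5 a b c d e).insert "type_col" v = pvMap5 a b c v e := rfl
theorem pvMap5_ins5 (a b c d e v : Option String) : (pvMap5 a b c d e).insert "country_col" v = pvMap5 a b c d v := rfl

theorem pvM1_eq (cl : String) :
    (PySem.Str.isIn "id" cl || PySem.Str.isIn "reference" cl || PySem.Str.isIn "ref" cl) = pvM1 cl := by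
  simp [pvM1, pvM, Bool.or_assoc]
theorem pvM2_eq (cl : String) :
    (PySem.Str.isIn "name" cl || PySem.Str.isIn "cust" cl || PySem.Str.isIn "client" cl ||
     PySem.Str.isIn "party" cl || PySem.Str.isIn "entity" cl) = pvM2 cl := by
  simp [pvM2, pvM, Bool.or_assoc]
theorem pvM3_eq (cl : String) :
    (PySem.Str.isIn "amount" cl || PySem.Str.isIn "value" cl || PySem.Str.isIn "sum" cl ||
     PySem.Str.isIn "total" cl || PySem.Str.isIn "amt" cl) = pvM3 cl := by
  simp [pvM3, pvM, Bool.or_assoc]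
theorem pvM4_eq (cl : String) :
    (PySem.Str.isIn "type" cl || PySem.Str.isIn "category" cl || PySem.Str.isIn "desc" cl ||
     PySem.Str.isIn "kind" cl) = pvM4 cl := by
  simp [pvM4, pvM, Bool.or_assoc]
theorem pvM5_eq (cl : String) :
    (PySem.Str.isIn "country" cl || PySem.Str.isIn "nation" cl || PySem.Str.isIn "juris" cl ||
     PySem.Str.isIn "dest" cl || PySem.Str.isIn "source" cl) = pvM5 cl := by
  simp [pvM5, pvM, Bool.or_assoc]

theorem pvStepA_five (x : String × String) (a b c d e : Option String) :
    pvStepA [(pvM1, a), (pvM2, b), (pvM3, c), (pvM4, d), (pvM5, e)] x =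
    (if !a.isSome && pvM1 x.1 then [(pvM1, some x.2), (pvM2, b), (pvM3, c), (pvM4, d), (pvM5, e)]
     else if !b.isSome && pvM2 x.1 then [(pvM1, a), (pvM2, some x.2), (pvM3, c), (pvM4, d), (pvM5, e)]
     else if !c.isSome && pvM3 x.1 then [(pvM1, a), (pvM2, b), (pvM3, some x.2), (pvM4, d), (pvM5, e)]
     else if !d.isSome && pvM4 x.1 then [(pvM1, a), (pvM2, b), (pvM3, c), (pvM4, some x.2), (pvM5, e)]
     else if !e.isSome && pvM5 x.1 then [(pvM1, a), (pvM2, b), (pvM3, c), (pvM4, d), (pvM5, some x.2)]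
     else [(pvM1, a), (pvM2, b), (pvM3, c), (pvM4, d), (pvM5, e)]) := by
  simp only [pvStepA]
  split_ifs <;> rfl

def pvNames : List String := ["id_col", "customer_col", "amount_col", "type_col", "country_col"]

def pvMapOf (rs : List ((String → Bool) × Option String)) : PySem.Dict String (Option String) :=
  PySem.Dict.mk (List.zip pvNames (rs.map (·.2)))

theorem pvPortStep (x : String × String) (a b c d e : Option String)
    (ha : pvOk a) (hb : pvOk b) (hc : pvOk c) (hd : pvOk d) (he : pvOk e) :
    (if !pvTruthy ((pvMap5 a b c d e).getD "id_col" none) &&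
          (PySem.Str.isIn "id" x.1 || PySem.Str.isIn "reference" x.1 || PySem.Str.isIn "ref" x.1) then
        (pvMap5 a b c d e).insert "id_col" (some x.2)
      else if !pvTruthy ((pvMap5 a b c d e).getD "customer_col" none) &&
          (PySem.Str.isIn "name" x.1 || PySem.Str.isIn "cust" x.1 || PySem.Str.isIn "client" x.1 ||
           PySem.Str.isIn "party" x.1 || PySem.Str.isIn "entity" x.1) then
        (pvMap5 a b c d e).insert "customer_col" (some x.2)
      else if !pvTruthy ((pvMap5 a b c d e).getD "amount_col" none) &&
          (PySem.Str.isIn "amount" x.1 || PySem.Str.isIn "value" x.1 || PySem.Str.isIn "sum" x.1 ||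
           PySem.Str.isIn "total" x.1 || PySem.Str.isIn "amt" x.1) then
        (pvMap5 a b c d e).insert "amount_col" (some x.2)
      else if !pvTruthy ((pvMap5 a b c d e).getD "type_col" none) &&
          (PySem.Str.isIn "type" x.1 || PySem.Str.isIn "category" x.1 || PySem.Str.isIn "desc" x.1 ||
           PySem.Str.isIn "kind" x.1) then
        (pvMap5 a b c d e).insert "type_col" (some x.2)
      else if !pvTruthy ((pvMap5 a b c d e).getD "country_col" none) &&
          (PySem.Str.isIn "country" x.1 || PySem.Str.isIn "nation" x.1 || PySem.Str.isIn "juris" x.1 ||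
           PySem.Str.isIn "dest" x.1 || PySem.Str.isIn "source" x.1) then
        (pvMap5 a b c d e).insert "country_col" (some x.2)
      else pvMap5 a b c d e) =
    (if !a.isSome && pvM1 x.1 then pvMap5 (some x.2) b c d e
     else if !b.isSome && pvM2 x.1 then pvMap5 a (some x.2) c d e
     else if !c.isSome && pvM3 x.1 then pvMap5 a b (some x.2) d e
     else if !d.isSome && pvM4 x.1 then pvMap5 a b c (some x.2) e
     else if !e.isSome && pvM5 x.1 then pvMap5 a b c d (some x.2)
     else pvMap5 a b c d e) := by
  simp only [pvMap5_getD1, pvMap5_getD2, pvMap5_getD3, pvMap5_getD4, pvMap5_getD5,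
    pvTruthy_ok a ha, pvTruthy_ok b hb, pvTruthy_ok c hc, pvTruthy_ok d hd, pvTruthy_ok e he,
    pvM1_eq, pvM2_eq, pvM3_eq, pvM4_eq, pvM5_eq,
    pvMap5_ins1, pvMap5_ins2, pvMap5_ins3, pvMap5_ins4, pvMap5_ins5]

theorem pvBridgeA : ∀ (items : List (String × String)),
    (∀ p ∈ items, pvAnyM p.1 = true → p.2 ≠ "") →
    ∀ (a b c d e : Option String), pvOk a → pvOk b → pvOk c → pvOk d → pvOk e →
    items.foldl (fun (m : PySem.Dict String (Option String)) (p : String × String) =>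
      if !pvTruthy (m.getD "id_col" none) &&
          (PySem.Str.isIn "id" p.1 || PySem.Str.isIn "reference" p.1 || PySem.Str.isIn "ref" p.1) then
        m.insert "id_col" (some p.2)
      else if !pvTruthy (m.getD "customer_col" none) &&
          (PySem.Str.isIn "name" p.1 || PySem.Str.isIn "cust" p.1 || PySem.Str.isIn "client" p.1 ||
           PySem.Str.isIn "party" p.1 || PySem.Str.isIn "entity" p.1) then
        m.insert "customer_col" (some p.2)
      else if !pvTruthy (m.getD "amount_col" none) &&
          (PySem.Str.isIn "amount" p.1 || PySem.Str.isIn "value" p.1 || PySem.Str.isIn "sum" p.1 ||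
           PySem.Str.isIn "total" p.1 || PySem.Str.isIn "amt" p.1) then
        m.insert "amount_col" (some p.2)
      else if !pvTruthy (m.getD "type_col" none) &&
          (PySem.Str.isIn "type" p.1 || PySem.Str.isIn "category" p.1 || PySem.Str.isIn "desc" p.1 ||
           PySem.Str.isIn "kind" p.1) then
        m.insert "type_col" (some p.2)
      else if !pvTruthy (m.getD "country_col" none) &&
          (PySem.Str.isIn "country" p.1 || PySem.Str.isIn "nation" p.1 || PySem.Str.isIn "juris" p.1 ||
           PySem.Str.isIn "dest" p.1 || PySem.Str.isIn "source" p.1) then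
        m.insert "country_col" (some p.2)
      else m) (pvMap5 a b c d e) =
    pvMapOf (pvRunA items [(pvM1, a), (pvM2, b), (pvM3, c), (pvM4, d), (pvM5, e)]) := by
  intro items
  induction items with
  | nil => intro _ a b c d e _ _ _ _ _; rfl
  | cons x rest ih =>
    intro hgood a b c d e ha hb hc hd he
    rw [List.foldl_cons, pvPortStep x a b c d e ha hb hc hd he]
    have hrest : ∀ p ∈ rest, pvAnyM p.1 = true → p.2 ≠ "" :=
      fun p hp => hgood p (by simp [hp])
    have hx : pvAnyM x.1 = true → x.2 ≠ "" := hgood x (by simp)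
    have hrun : pvRunA (x :: rest) [(pvM1, a), (pvM2, b), (pvM3, c), (pvM4, d), (pvM5, e)] =
        pvRunA rest (pvStepA [(pvM1, a), (pvM2, b), (pvM3, c), (pvM4, d), (pvM5, e)] x) := rfl
    rw [hrun, pvStepA_five]
    by_cases h1 : (!a.isSome && pvM1 x.1) = true
    · rw [if_pos h1, if_pos h1]
      exact ih hrest _ b c d e
        (Or.inr ⟨x.2, rfl, hx (by simp only [pvAnyM, (Bool.and_eq_true _ _).mp h1 |>.2]; simp)⟩)
        hb hc hd he
    · rw [if_neg h1, if_neg h1]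
      by_cases h2 : (!b.isSome && pvM2 x.1) = true
      · rw [if_pos h2, if_pos h2]
        exact ih hrest a _ c d e ha
          (Or.inr ⟨x.2, rfl, hx (by simp only [pvAnyM, (Bool.and_eq_true _ _).mp h2 |>.2]; simp)⟩)
          hc hd he
      · rw [if_neg h2, if_neg h2]
        by_cases h3 : (!c.isSome && pvM3 x.1) = true
        · rw [if_pos h3, if_pos h3]
          exact ih hrest a b _ d e ha hb
            (Or.inr ⟨x.2, rfl, hx (by simp only [pvAnyM, (Bool.and_eq_true _ _).mp h3 |>.2]; simp)⟩)
            hd he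
        · rw [if_neg h3, if_neg h3]
          by_cases h4 : (!d.isSome && pvM4 x.1) = true
          · rw [if_pos h4, if_pos h4]
            exact ih hrest a b c _ e ha hb hc
              (Or.inr ⟨x.2, rfl, hx (by simp only [pvAnyM, (Bool.and_eq_true _ _).mp h4 |>.2]; simp)⟩)
              he
          · rw [if_neg h4, if_neg h4]
            by_cases h5 : (!e.isSome && pvM5 x.1) = true
            · rw [if_pos h5, if_pos h5]
              exact ih hrest a b c d _ ha hb hc hd
                (Or.inr ⟨x.2, rfl, hx (by simp only [pvAnyM, (Bool.and_eq_true _ _).mp h5 |>.2]; simp)⟩)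
            · rw [if_neg h5, if_neg h5]
              exact ih hrest a b c d e ha hb hc hd he

theorem pvBridgeB : ∀ (rks : List (String × List String)) (items : List (String × String))
    (d : PySem.Dict String (Option String)) (u : PySem.Set String),
    (∀ rk ∈ rks, d.contains rk.1 = false) → (rks.map Prod.fst).Nodup →
    (rks.foldl (fun (st : PySem.Dict String (Option String) × PySem.Set String) rk =>
      match items.find? (fun p => !st.2.contains p.1 && rk.2.any (fun kw => PySem.Str.isIn kw p.1)) with
      | some p => (st.1.insert rk.1 (some p.2), st.2.add p.1)
      | none => (st.1.insert rk.1 none, st.2)) (d, u)).1 =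
    PySem.Dict.mk (d.items ++
      List.zip (rks.map Prod.fst) (pvRunB items (rks.map (fun rk => (pvM rk.2, none))) u)) := by
  intro rks
  induction rks with
  | nil => intro items d u _ _; simp
  | cons rk rks ih =>
    intro items d u hfresh hnd
    obtain ⟨name, kws⟩ := rk
    rw [List.foldl_cons]
    have hpv : items.find? (fun p => !u.contains p.1 && (name, kws).2.any (fun kw => PySem.Str.isIn kw p.1)) =
        pvFind (pvM kws) u items := rfl
    simp only [List.map_cons, pvRunB]
    cases hf : pvFind (pvM kws) u items with
    | some p =>
      dsimp only
      rw [hpv, hf]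
      dsimp only
      rw [ih items (d.insert name (some p.2)) (PySem.Set.add u p.1)
        (by
          intro rk2 hrk2
          rw [PySem.Dict.contains_insert]
          have hne : rk2.1 ≠ name := by
            simp only [List.map_cons, List.nodup_cons] at hnd
            intro h
            exact hnd.1 (h ▸ List.mem_map_of_mem hrk2)
          rw [hfresh rk2 (by simp [hrk2])]
          simp [hne])
        (by simp only [List.map_cons, List.nodup_cons] at hnd; exact hnd.2)]
      rw [PySem.Dict.items_insert_of_not_contains _ _ (hfresh (name, kws) (by simp))]
      simp
    | none =>
      dsimp only
      rw [hpv, hf]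
      dsimp only
      rw [ih items (d.insert name none) u
        (by
          intro rk2 hrk2
          rw [PySem.Dict.contains_insert]
          have hne : rk2.1 ≠ name := by
            simp only [List.map_cons, List.nodup_cons] at hnd
            intro h
            exact hnd.1 (h ▸ List.mem_map_of_mem hrk2)
          rw [hfresh rk2 (by simp [hrk2])]
          simp [hne])
        (by simp only [List.map_cons, List.nodup_cons] at hnd; exact hnd.2)]
      rw [PySem.Dict.items_insert_of_not_contains _ _ (hfresh (name, kws) (by simp))]
      simp

theorem pvColsLower : ∀ (columns : List String) (d : PySem.Dict String String),
    (∀ p ∈ d.items, p.1 = PySem.Str.lower p.2) →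
    ∀ p ∈ (columns.foldl (fun d c => d.insert (PySem.Str.lower c) c) d).items,
      p.1 = PySem.Str.lower p.2 := by
  intro columns
  induction columns with
  | nil => intro d hd p hp; exact hd p hp
  | cons c rest ih =>
    intro d hd p hp
    rw [List.foldl_cons] at hp
    refine ih (d.insert (PySem.Str.lower c) c) ?_ p hp
    intro q hq
    rcases (PySem.Dict.mem_items_insert _ _ _ _).mp hq with h | ⟨h, _⟩
    · rw [h]
    · exact hd q h

theorem pvInitChain :
    (((((PySem.Dict.empty.insert "id_col" (none : Option String)).insert "customer_col" none).insert
        "amount_col" none).insert "type_col" none).insert "country_col" none) =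
    pvMap5 none none none none none := rfl

-- ===== VERDICT (by name: the statement is the Claim_ definition above) =====
theorem identify_columns_spec : Claim_equal_identify_columns := by
  intro columns _
  unfold Spec_identify_columns
  simp only [identify_columns, identify_columns_alt]
  have hlow := pvColsLower columns PySem.Dict.empty (by intro p hp; cases hp)
  have hgood : ∀ p ∈ (columns.foldl (fun d c => d.insert (PySem.Str.lower c) c)
      PySem.Dict.empty).items, pvAnyM p.1 = true → p.2 ≠ "" := by
    intro p hp hany hpe
    have h1 := hlow p hp
    rw [hpe] at h1
    have h2 : p.1 = "" := by simpa using h1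
    rw [h2] at hany
    exact absurd hany (by decide)
  have hnodup : (((columns.foldl (fun d c => d.insert (PySem.Str.lower c) c)
      PySem.Dict.empty).items).map Prod.fst).Nodup := by
    have h := PySem.Dict.nodup_keys_foldl_insert_key columns (fun c => PySem.Str.lower c)
      (fun _ c => c) PySem.Dict.empty (by exact PySem.Dict.nodup_keys_empty)
    simpa [PySem.Dict.keys] using h
  rw [pvInitChain]
  rw [pvBridgeA _ hgood none none none none none
    (Or.inl rfl) (Or.inl rfl) (Or.inl rfl) (Or.inl rfl) (Or.inl rfl)]
  rw [pvBridgeB pvRoleKeywords _ PySem.Dict.empty (PySem.Set.ofList [])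
    (by intro rk _; rfl) (by decide)]
  have h5 : pvRoleKeywords.map (fun rk => (pvM rk.2, (none : Option String))) =
      [(pvM1, (none : Option String)), (pvM2, none), (pvM3, none), (pvM4, none), (pvM5, none)] := rfl
  rw [h5]
  rw [← pvRunA_eq_runB _ hnodup
    [(pvM1, (none : Option String)), (pvM2, none), (pvM3, none), (pvM4, none), (pvM5, none)]
    (PySem.Set.ofList []) (by intro k hk; simp at hk)]
  rfl
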